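-- pv_equiv track=rewrite | github.com/pedr0passos/trabalho2-metodos | main.py | busca_local
-- ===== SOURCE A (Python) =====
-- def calcular_fo(solucao, custos):
--     # Função para calcular a função objetivo (FO)
--     maior_ciclo = 0
--     for maquina in solucao:
--         ciclo = sum(custos[tarefa] for tarefa in maquina)
--         maior_ciclo = max(maior_ciclo, ciclo)
--     return maior_ciclo
--
-- def verifica_precedencia(solucao, precedencias):
--     """
--     Verifica se a solução atual respeita as precedências definidas.
--
--     Parâmetros:
--     - solucao: A solução atual, onde cada sublista representa as tarefas atribuídas a uma máquina.
--     - precedencias: Dicionário que contém, para cada tarefa, uma lista de tarefas que a precedem.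
--
--     Retorna:
--     - True se as precedências forem respeitadas, False caso contrário.
--     """
--     tarefas_concluidas = set()  # Conjunto para armazenar as tarefas que já foram concluídas
--
--     # Itera sobre as máquinas e suas respectivas tarefas
--     for maquina in solucao:
--         for tarefa in maquina:
--             # Verifica se todas as tarefas que precedem a tarefa atual foram concluídas
--             if not all(precedencia in tarefas_concluidas for precedencia in precedencias[tarefa]):
--                 return False  # Retorna False se alguma precedência não for respeitada
--
--             # Adiciona a tarefa atual ao conjunto de tarefas concluídas
--             tarefas_concluidas.add(tarefa)
--
--     return True  # Todas as precedências foram respeitadas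
--
-- def busca_local(solucao, custos, precedencias):
--     """
--     Aplica uma busca local para tentar melhorar a solução atual.
--     Troca tarefas entre máquinas e verifica se a nova solução é melhor.
--     """
--     solucao_melhorada = [maquina[:] for maquina in solucao]  # Copia a solução atual
--     fo_melhorada = calcular_fo(solucao_melhorada, custos)
--
--     numero_de_maquinas = len(solucao)
--     melhor_fo = fo_melhorada
--     melhor_solucao = solucao_melhorada
--
--     # Tenta trocar tarefas entre pares de máquinas para melhorar o FO
--     for i in range(numero_de_maquinas):
--         for j in range(i + 1, numero_de_maquinas):
--             for t1 in solucao_melhorada[i]: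
--                 for t2 in solucao_melhorada[j]:
--
--                     # Cria uma nova solução a partir da troca de tarefas
--                     nova_solucao = [maquina[:] for maquina in solucao_melhorada]
--
--                     # Troca as tarefas entre as máquinas
--                     nova_solucao[i].remove(t1)
--                     nova_solucao[j].remove(t2)
--                     nova_solucao[i].append(t2)
--                     nova_solucao[j].append(t1)
--
--                     if not verifica_precedencia(nova_solucao, precedencias):
--                         continue  # Se a nova solução violar precedências, ignora
--
--                     nova_fo = calcular_fo(nova_solucao, custos)
--
--                     if nova_fo < melhor_fo:
--                         melhor_fo = nova_fo  # Atualiza o melhor FO encontrado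
--                         melhor_solucao = nova_solucao  # Atualiza a melhor solução
--
--     return melhor_solucao, melhor_fo
-- ===== SOURCE B (Python) =====
-- def verifica_precedencia(solucao, precedencias):
--     tarefas_concluidas = set()
--     for maquina in solucao:
--         for tarefa in maquina:
--             if not all(precedencia in tarefas_concluidas for precedencia in precedencias[tarefa]):
--                 return False
--             tarefas_concluidas.add(tarefa)
--     return True
--
-- def busca_local(solucao, custos, precedencias):
--     """Busca local: mesma vizinhanca e ordem de A, mas a FO de cada vizinho e
--     calculada incrementalmente a partir de ciclos pre-computados, em vez de
--     re-somar a solucao inteira a cada candidato."""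
--     ciclos = [sum(custos[t] for t in maquina) for maquina in solucao]
--     fo = max([0] + ciclos)
--     melhor_solucao = [maquina[:] for maquina in solucao]
--     melhor_fo = fo
--     n = len(solucao)
--     pares = [(i, j) for i in range(n) for j in range(i + 1, n)]
--     for (i, j) in pares:
--         base = max([0] + ciclos[:i] + ciclos[i + 1:j] + ciclos[j + 1:])
--         for t1 in solucao[i]:
--             for t2 in solucao[j]:
--                 nova_solucao = [maquina[:] for maquina in solucao]
--                 nova_solucao[i].remove(t1)
--                 nova_solucao[j].remove(t2)
--                 nova_solucao[i].append(t2)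
--                 nova_solucao[j].append(t1)
--                 if not verifica_precedencia(nova_solucao, precedencias):
--                     continue
--                 nova_fo = max(base,
--                               ciclos[i] - custos[t1] + custos[t2],
--                               ciclos[j] - custos[t2] + custos[t1])
--                 if nova_fo < melhor_fo:
--                     melhor_fo = nova_fo
--                     melhor_solucao = nova_solucao
--     return melhor_solucao, melhor_fo
-- ===== Notes on version B (the rewrite author's own statement) =====
-- stated objective: alternative
-- what changed: B precomputes each machine's cycle sum once, seeds the objective as max([0]+ciclos), and evaluates each candidate swap with a per-pair 'base' max over the untouched machines plus incremental updates of the two touched cycles, instead of A's full calcular_fo re-sum of the whole solution for every candidate; the pair loop is driven by a precomputed pair list.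
import Mathlib
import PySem

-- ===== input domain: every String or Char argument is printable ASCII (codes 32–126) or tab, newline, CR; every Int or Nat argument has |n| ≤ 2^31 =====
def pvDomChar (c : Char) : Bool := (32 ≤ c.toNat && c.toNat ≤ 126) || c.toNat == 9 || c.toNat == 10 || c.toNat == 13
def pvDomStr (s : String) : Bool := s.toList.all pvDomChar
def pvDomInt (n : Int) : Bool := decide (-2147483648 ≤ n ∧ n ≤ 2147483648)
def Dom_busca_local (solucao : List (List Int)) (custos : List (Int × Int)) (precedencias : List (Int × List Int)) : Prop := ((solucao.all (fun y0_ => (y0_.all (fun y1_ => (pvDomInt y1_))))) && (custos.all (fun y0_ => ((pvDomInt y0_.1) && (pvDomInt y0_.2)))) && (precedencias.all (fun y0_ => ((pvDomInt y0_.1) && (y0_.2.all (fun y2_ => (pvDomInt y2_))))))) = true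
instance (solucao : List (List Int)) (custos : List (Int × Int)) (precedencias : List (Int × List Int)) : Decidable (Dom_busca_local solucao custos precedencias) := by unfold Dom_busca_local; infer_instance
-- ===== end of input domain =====

-- B replaces the full calcular_fo re-sum of every candidate by precomputed machine cycle sums:
-- per machine pair a `base` max over the untouched machines, and the two touched machines updated
-- incrementally (exact on Int costs); neighbourhood, iteration order and tie-breaking are unchanged.

-- ===== PORT A =====
-- custos[t] / precedencias[t]: dict lookups, total under Pre_ (keys present)
def pvCost (custos : List (Int × Int)) (t : Int) : Int := (PySem.Dict.mk custos).getD t 0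

-- ciclo = sum(custos[tarefa] for tarefa in maquina)
def pvCiclo (custos : List (Int × Int)) (maquina : List Int) : Int :=
  maquina.foldl (fun s t => s + pvCost custos t) 0

def calcular_fo (solucao : List (List Int)) (custos : List (Int × Int)) : Int :=
  solucao.foldl (fun maior maquina => max maior (pvCiclo custos maquina)) 0

-- inner loop of verifica_precedencia over one machine's tasks (none = early `return False`)
def pvVpMaq (prec : PySem.Dict Int (List Int)) (maquina : List Int) (done : PySem.Set Int) :
    Option (PySem.Set Int) :=
  match maquina with
  | [] => some done
  | t :: rest =>
      if (prec.getD t []).all (fun p => PySem.Set.contains done p) then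
        pvVpMaq prec rest (PySem.Set.add done t)
      else none

def pvVpAll (prec : PySem.Dict Int (List Int)) (maqs : List (List Int)) (done : PySem.Set Int) :
    Option (PySem.Set Int) :=
  match maqs with
  | [] => some done
  | m :: rest =>
      match pvVpMaq prec m done with
      | none => none
      | some d => pvVpAll prec rest d

def verifica_precedencia (solucao : List (List Int)) (precedencias : List (Int × List Int)) : Bool :=
  (pvVpAll (PySem.Dict.mk precedencias) solucao PySem.Set.empty).isSome

-- nova_solucao[i].remove(t1); nova_solucao[j].remove(t2); nova_solucao[i].append(t2); nova_solucao[j].append(t1)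
def pvRemove (l : List Int) (v : Int) : List Int := (PySem.List.remove? l v).getD l

def pvSwap (sol : List (List Int)) (i j t1 t2 : Int) : List (List Int) :=
  let s1 := PySem.List.pySetD sol i (pvRemove (PySem.List.pyGetD sol i []) t1)
  let s2 := PySem.List.pySetD s1 j (pvRemove (PySem.List.pyGetD s1 j []) t2)
  let s3 := PySem.List.pySetD s2 i (PySem.List.pyGetD s2 i [] ++ [t2])
  PySem.List.pySetD s3 j (PySem.List.pyGetD s3 j [] ++ [t1])

def busca_local (solucao : List (List Int)) (custos : List (Int × Int)) (precedencias : List (Int × List Int)) : List (List Int) × Int :=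
  let solucao_melhorada := solucao.map (fun maquina => maquina)
  let fo_melhorada := calcular_fo solucao_melhorada custos
  let n : Int := solucao.length
  (PySem.List.pyRange 0 n 1).foldl (fun st i =>
    (PySem.List.pyRange (i + 1) n 1).foldl (fun st j =>
      (PySem.List.pyGetD solucao_melhorada i []).foldl (fun st t1 =>
        (PySem.List.pyGetD solucao_melhorada j []).foldl (fun st t2 =>
          let nova_solucao := pvSwap solucao_melhorada i j t1 t2
          if verifica_precedencia nova_solucao precedencias then
            let nova_fo := calcular_fo nova_solucao custos
            if nova_fo < st.2 then (nova_solucao, nova_fo) else st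
          else st) st) st) st) (solucao_melhorada, fo_melhorada)

-- ===== PORT B =====
-- max([0] + xs)  (Python max of a nonempty list)
def pvMax0 (xs : List Int) : Int := (PySem.List.max? (0 :: xs) (fun y => y)).getD 0

def busca_local_alt (solucao : List (List Int)) (custos : List (Int × Int)) (precedencias : List (Int × List Int)) : List (List Int) × Int :=
  let ciclos := solucao.map (fun maquina => pvCiclo custos maquina)
  let fo := pvMax0 ciclos
  let n : Int := solucao.length
  let pares := (PySem.List.pyRange 0 n 1).flatMap
      (fun i => (PySem.List.pyRange (i + 1) n 1).map (fun j => (i, j)))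
  pares.foldl (fun st p =>
    let i := p.1
    let j := p.2
    let base := pvMax0 (PySem.List.slice ciclos none (some i)
        ++ PySem.List.slice ciclos (some (i + 1)) (some j)
        ++ PySem.List.slice ciclos (some (j + 1)) none)
    (PySem.List.pyGetD solucao i []).foldl (fun st t1 =>
      (PySem.List.pyGetD solucao j []).foldl (fun st t2 =>
        let nova_solucao := pvSwap solucao i j t1 t2
        if verifica_precedencia nova_solucao precedencias then
          let nova_fo := max (max base
              (PySem.List.pyGetD ciclos i 0 - pvCost custos t1 + pvCost custos t2))
              (PySem.List.pyGetD ciclos j 0 - pvCost custos t2 + pvCost custos t1)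
          if nova_fo < st.2 then (nova_solucao, nova_fo) else st
        else st) st) st) (solucao.map (fun maquina => maquina), fo)

-- ===== PRECONDITION & SPEC =====
-- Pre_ excludes inputs where a task misses a key of `custos` (KeyError in calcular_fo), and —
-- when at least two machines are nonempty, so that swap candidates exist — inputs where a task
-- misses a key of `precedencias`: whether A's KeyError there is actually reached depends on the
-- dynamic order of precedence checks, so a few inputs on which A happens to return are excluded.
def Pre_busca_local (solucao : List (List Int)) (custos : List (Int × Int)) (precedencias : List (Int × List Int)) : Prop :=
  (∀ m ∈ solucao, ∀ t ∈ m, (PySem.Dict.mk custos).contains t = true) ∧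
  (2 ≤ solucao.countP (fun m => !m.isEmpty) →
    ∀ m ∈ solucao, ∀ t ∈ m, (PySem.Dict.mk precedencias).contains t = true)
instance (solucao : List (List Int)) (custos : List (Int × Int)) (precedencias : List (Int × List Int)) : Decidable (Pre_busca_local solucao custos precedencias) := by unfold Pre_busca_local; infer_instance

def pvWitness_busca_local : List (List Int) × (List (Int × Int)) × (List (Int × List Int)) :=
  ([[0], [1]], [(0, 3), (1, 2)], [(0, []), (1, [])])

def Spec_busca_local (solucao : List (List Int)) (custos : List (Int × Int)) (precedencias : List (Int × List Int)) (out : List (List Int) × Int) : Prop := out = busca_local_alt solucao custos precedencias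
instance (solucao : List (List Int)) (custos : List (Int × Int)) (precedencias : List (Int × List Int)) (out : List (List Int) × Int) : Decidable (Spec_busca_local solucao custos precedencias out) := by unfold Spec_busca_local; infer_instance

-- ===== CLAIM (what is proved, stated in full; the proofs are below) =====
def Claim_equal_busca_local : Prop := ∀ (solucao : List (List Int)) (custos : List (Int × Int)) (precedencias : List (Int × List Int)), Dom_busca_local solucao custos precedencias → Pre_busca_local solucao custos precedencias → Spec_busca_local solucao custos precedencias (busca_local solucao custos precedencias)

-- ===== LEMMAS AND PROOFS =====

-- a fold over the flattened pair list is the nested fold (B's `pares` loop vs A's nested ranges)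
theorem pv_foldl_flatMap {α β γ : Type} (l : List α) (f : α → List β) (g : γ → β → γ) (init : γ) :
    (l.flatMap f).foldl g init = l.foldl (fun s a => (f a).foldl g s) init := by
  induction l generalizing init with
  | nil => rfl
  | cons a l ih => simp [List.foldl_append, ih]

-- max([0] + xs) is the running max from 0
theorem pv_pvMax0_eq (xs : List Int) : pvMax0 xs = xs.foldl max 0 := by
  unfold pvMax0
  rw [PySem.List.max?_id_cons, Option.getD_some]

theorem pv_calc_fo_F (sol : List (List Int)) (custos : List (Int × Int)) :
    calcular_fo sol custos = (sol.map (fun maquina => pvCiclo custos maquina)).foldl max 0 := by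
  unfold calcular_fo
  rw [List.foldl_map]

theorem pv_calc_fo_eq_pvMax0 (sol : List (List Int)) (custos : List (Int × Int)) :
    calcular_fo sol custos = pvMax0 (sol.map (fun maquina => pvCiclo custos maquina)) := by
  rw [pv_pvMax0_eq, pv_calc_fo_F]

theorem pv_F_nonneg (l : List Int) : 0 ≤ l.foldl max 0 := (PySem.List.le_foldl_max l 0).1

theorem pv_F_pull (l : List Int) (a : Int) (h : 0 ≤ a) : l.foldl max a = max a (l.foldl max 0) := by
  induction l generalizing a with
  | nil => simp [max_eq_left h]
  | cons c l ih =>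
      have h1 : (0:Int) ≤ max a c := le_max_of_le_left h
      have h2 : (0:Int) ≤ max 0 c := le_max_left 0 c
      simp only [List.foldl_cons]
      rw [ih (max a c) h1, ih (max 0 c) h2]
      have e : max a c = max a (max 0 c) := by
        simp only [max_def]; split_ifs <;> omega
      rw [e, max_assoc]

theorem pv_F_append (A B : List Int) : (A ++ B).foldl max 0 = max (A.foldl max 0) (B.foldl max 0) := by
  rw [List.foldl_append, pv_F_pull B _ (pv_F_nonneg A)]

theorem pv_F_cons (x : Int) (B : List Int) : (x :: B).foldl max 0 = max (max 0 x) (B.foldl max 0) := by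
  simp only [List.foldl_cons]
  exact pv_F_pull B _ (le_max_left 0 x)

theorem pv_maxfin (x y p q r : Int) (hp : 0 ≤ p) (hq : 0 ≤ q) (hr : 0 ≤ r) :
    max p (max (max 0 x) (max q (max (max 0 y) r))) = max (max (max p (max q r)) x) y := by
  simp only [max_def]
  split_ifs <;> omega

-- machine sum after remove(t1); append(t2), in incremental form
theorem pv_ciclo_swap (custos : List (Int × Int)) (m : List Int) (t1 t2 : Int) (h : t1 ∈ m) :
    pvCiclo custos (pvRemove m t1 ++ [t2]) =
      pvCiclo custos m - pvCost custos t1 + pvCost custos t2 := by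
  have hsum : ∀ l : List Int, pvCiclo custos l = (l.map (pvCost custos)).sum := by
    intro l
    unfold pvCiclo
    rw [PySem.List.foldl_add, zero_add]
  have hrem : pvRemove m t1 = m.erase t1 := by
    unfold pvRemove
    rw [PySem.List.remove?_eq_some_erase m t1 h, Option.getD_some]
  have hperm : (m.map (pvCost custos)).sum = ((t1 :: m.erase t1).map (pvCost custos)).sum :=
    ((List.perm_cons_erase h).map (pvCost custos)).sum_eq
  rw [hsum, hsum, hrem, List.map_append, List.sum_append, hperm]
  simp only [List.map_cons, List.sum_cons, List.map_nil, List.sum_nil]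
  ring

-- the four in-place steps of the swap, as two functional updates of the original solution
theorem pv_swap_shape (sol : List (List Int)) (i' j' : Nat) (t1 t2 : Int)
    (hij : i' < j') (hj : j' < sol.length) :
    pvSwap sol (i' : Int) (j' : Int) t1 t2 =
      (sol.set i' (pvRemove (sol.getD i' []) t1 ++ [t2])).set j'
        (pvRemove (sol.getD j' []) t2 ++ [t1]) := by
  have hne : i' ≠ j' := Nat.ne_of_lt hij
  have hi : i' < sol.length := lt_trans hij hj
  simp only [pvSwap, PySem.List.pySetD_natCast, PySem.List.pyGetD_natCast]
  have e1 : (sol.set i' (pvRemove (sol.getD i' []) t1)).getD j' ([] : List Int) = sol.getD j' [] := by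
    simp [List.getD, List.getElem?_set_ne hne]
  rw [e1]
  have e2 : ((sol.set i' (pvRemove (sol.getD i' []) t1)).set j'
      (pvRemove (sol.getD j' []) t2)).getD i' ([] : List Int) = pvRemove (sol.getD i' []) t1 := by
    simp [List.getD, List.getElem?_set_ne (Ne.symm hne), List.getElem?_set_self hi]
  rw [e2]
  have hj2 : j' < (sol.set i' (pvRemove (sol[i']?.getD ([] : List Int)) t1)).length := by simpa using hj
  have e3 : (((sol.set i' (pvRemove (sol.getD i' []) t1)).set j' (pvRemove (sol.getD j' []) t2)).set i'
      (pvRemove (sol.getD i' []) t1 ++ [t2])).getD j' ([] : List Int) = pvRemove (sol.getD j' []) t2 := by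
    simp [List.getD, List.getElem?_set_ne hne, List.getElem?_set_self hj2]
  rw [e3]
  rw [List.set_comm _ _ hne, List.set_set, List.set_comm _ _ (Ne.symm hne), List.set_set]

-- KEY IDENTITY: A's full re-sum objective of a swapped neighbour equals B's base + incremental form
theorem pv_nf_eq (custos : List (Int × Int)) (sol : List (List Int)) (i j t1 t2 : Int)
    (hi : 0 ≤ i) (hij : i < j) (hj : j < (sol.length : Int))
    (h1 : t1 ∈ PySem.List.pyGetD sol i ([] : List Int))
    (h2 : t2 ∈ PySem.List.pyGetD sol j ([] : List Int)) :
    calcular_fo (pvSwap sol i j t1 t2) custos =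
      max (max (pvMax0 (PySem.List.slice (sol.map (fun maquina => pvCiclo custos maquina)) none (some i)
          ++ PySem.List.slice (sol.map (fun maquina => pvCiclo custos maquina)) (some (i + 1)) (some j)
          ++ PySem.List.slice (sol.map (fun maquina => pvCiclo custos maquina)) (some (j + 1)) none))
        (PySem.List.pyGetD (sol.map (fun maquina => pvCiclo custos maquina)) i 0 - pvCost custos t1 + pvCost custos t2))
        (PySem.List.pyGetD (sol.map (fun maquina => pvCiclo custos maquina)) j 0 - pvCost custos t2 + pvCost custos t1) := by
  obtain ⟨i', rfl⟩ : ∃ k : Nat, i = (k : Int) := ⟨i.toNat, (Int.toNat_of_nonneg hi).symm⟩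
  obtain ⟨j', rfl⟩ : ∃ k : Nat, j = (k : Int) := ⟨j.toNat, (Int.toNat_of_nonneg (by omega)).symm⟩
  have hij' : i' < j' := by exact_mod_cast hij
  have hj'' : j' < sol.length := by exact_mod_cast hj
  have hi'' : i' < sol.length := lt_trans hij' hj''
  rw [PySem.List.pyGetD_natCast, List.getD_eq_getElem _ _ hi''] at h1
  rw [PySem.List.pyGetD_natCast, List.getD_eq_getElem _ _ hj''] at h2
  set f : List Int → Int := fun maquina => pvCiclo custos maquina with hf
  set CL : List Int := sol.map f with hCL
  have hlenCL : CL.length = sol.length := by rw [hCL, List.length_map]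
  -- left side: shape of the swapped solution, then its objective as a fold over updated cycles
  rw [pv_swap_shape sol i' j' t1 t2 hij' hj'', pv_calc_fo_F,
      List.getD_eq_getElem _ _ hi'', List.getD_eq_getElem _ _ hj'',
      List.map_set, List.map_set, ← hCL]
  set x : Int := f (pvRemove (sol[i']'hi'') t1 ++ [t2]) with hx
  set y : Int := f (pvRemove (sol[j']'hj'') t2 ++ [t1]) with hy
  have hsetlen : j' < (CL.set i' x).length := by simp [hlenCL, hj'']
  rw [List.set_eq_take_cons_drop y hsetlen, List.take_set, List.drop_set_of_lt (by omega),
      List.set_eq_take_cons_drop x (by rw [List.length_take]; exact lt_min_iff.mpr ⟨hij', by omega⟩),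
      List.take_take, Nat.min_eq_left (le_of_lt hij'), List.drop_take]
  -- right side: slices and lookups in terms of take/drop and getElem
  have hc1 : ((i' : Int) + 1) = (((i' + 1 : Nat)) : Int) := by push_cast; ring
  have hc2 : ((j' : Int) + 1) = (((j' + 1 : Nat)) : Int) := by push_cast; ring
  rw [hc1, hc2, PySem.List.slice_to_natCast, PySem.List.slice_from_natCast, PySem.List.slice_natCast,
      pv_pvMax0_eq, PySem.List.pyGetD_natCast, PySem.List.pyGetD_natCast,
      List.getD_eq_getElem _ _ (by omega : i' < CL.length), List.getD_eq_getElem _ _ (by omega : j' < CL.length)]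
  -- the two updated machines, incrementally
  have eci : CL[i']'(by omega) = pvCiclo custos (sol[i']'hi'') := by
    simp [hCL, hf]
  have ecj : CL[j']'(by omega) = pvCiclo custos (sol[j']'hj'') := by
    simp [hCL, hf]
  have hxv : x = CL[i']'(by omega) - pvCost custos t1 + pvCost custos t2 := by
    rw [hx]
    simp only [hf]
    rw [pv_ciclo_swap custos _ t1 t2 h1]
    omega
  have hyv : y = CL[j']'(by omega) - pvCost custos t2 + pvCost custos t1 := by
    rw [hy]
    simp only [hf]
    rw [pv_ciclo_swap custos _ t2 t1 h2]
    omega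
  rw [← hxv, ← hyv]
  simp only [List.cons_append, List.append_assoc, pv_F_append, pv_F_cons]
  exact pv_maxfin x y _ _ _ (pv_F_nonneg _) (pv_F_nonneg _) (pv_F_nonneg _)

theorem pv_ports_eq (sol : List (List Int)) (custos : List (Int × Int)) (prec : List (Int × List Int)) :
    busca_local sol custos prec = busca_local_alt sol custos prec := by
  unfold busca_local busca_local_alt
  simp only [List.map_id']
  rw [pv_foldl_flatMap]
  simp only [List.foldl_map]
  rw [pv_calc_fo_eq_pvMax0 sol custos]
  apply PySem.List.foldl_congr_mem
  intro st i hi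
  rw [PySem.List.mem_pyRange_one] at hi
  apply PySem.List.foldl_congr_mem
  intro st2 j hj
  rw [PySem.List.mem_pyRange_one] at hj
  try simp only []
  apply PySem.List.foldl_congr_mem
  intro st3 t1 ht1
  apply PySem.List.foldl_congr_mem
  intro st4 t2 ht2
  try simp only []
  rw [pv_nf_eq custos sol i j t1 t2 hi.1 (by omega) hj.2 ht1 ht2]

-- ===== VERDICT (by name: the statement is the Claim_ definition above) =====
theorem busca_local_spec : Claim_equal_busca_local := by
  intro solucao custos precedencias _hdom _hpre
  unfold Spec_busca_local
  exact pv_ports_eq solucao custos precedencias
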